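-- pv_equiv track=rewrite | github.com/lelong03/python_algorithm | interview/Lazada/phone_bill.py | solution
-- ===== SOURCE A (Python) =====
-- def duration_to_second(duration):
--     hour, minute, second = duration.split(":")
--     return int(hour) * 3600 + int(minute) * 60 + int(second)
--
-- def build_phone_log_dict(calls):
--     logs = {}
--     for call in calls:
--         duration, phone_num = call.split(",")
--         if not phone_num:
--             continue
--         if phone_num not in logs:
--             logs[phone_num] = duration_to_second(duration)
--         else:
--             logs[phone_num] += duration_to_second(duration)
--     return logs
--
-- def get_free_phone_number(logs):
--     max_duration = 0
--     free_phone_number = None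
--     for phone_num in logs:
--         if logs[phone_num] > max_duration:
--             max_duration = logs[phone_num]
--             free_phone_number = phone_num
--         elif logs[phone_num] == max_duration:
--             if phone_num < free_phone_number:
--                 free_phone_number = phone_num
--     return free_phone_number
--
-- def solution(S):
--     calls = S.splitlines()
--     if len(calls) == 0:
--         return 0
--
--     logs = build_phone_log_dict(calls)
--     free_phone_number = get_free_phone_number(logs)
--     amount = 0
--     for call in calls:
--         duration, phone_num = call.split(",")
--         if not phone_num:
--             continue
--         if phone_num == free_phone_number:
--             continue
--         seconds = duration_to_second(duration)
--         if seconds < 300: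
--             amount += 3 * seconds
--         else:
--             minutes = (seconds // 60) + (1 if seconds % 60 else 0)
--             amount += 150 * minutes
--     return amount
-- ===== SOURCE B (Python) =====
-- def solution(S):
--     calls = S.splitlines()
--     if len(calls) == 0:
--         return 0
--     dur = {}
--     cost = {}
--     total = 0
--     for call in calls:
--         duration, phone = call.split(",")
--         if not phone:
--             continue
--         h, m, s = duration.split(":")
--         seconds = int(h) * 3600 + int(m) * 60 + int(s)
--         if seconds < 300:
--             c = 3 * seconds
--         else:
--             c = 150 * ((seconds // 60) + (1 if seconds % 60 else 0))
--         dur[phone] = dur.get(phone, 0) + seconds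
--         cost[phone] = cost.get(phone, 0) + c
--         total += c
--     best_d = 0
--     best = None
--     for phone, d in dur.items():
--         if d > best_d or (d == best_d and best is not None and phone < best):
--             best_d = d
--             best = phone
--     return total - (cost[best] if best is not None else 0)
-- ===== Notes on version B (the rewrite author's own statement) =====
-- stated objective: alternative
-- what changed: B makes one combined pass that builds the per-number duration dict, a per-number billed-cost dict and the grand total, then answers by subtracting the free number's precomputed cost, eliminating A's third pass which re-splits and re-parses every line (and A's double parsing of each duration).
-- crash fix: On inputs whose lines all parse but where the first phone number (in order of first appearance) with nonnegative total duration has total exactly 0, A raises TypeError ('<' between str and None); B returns the total cost with no free number subtracted. — e.g. on solution("0:00:00,a\n0:01:00,b\n0:00:50,c"): A raises TypeError, B returns 150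
import Mathlib
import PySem

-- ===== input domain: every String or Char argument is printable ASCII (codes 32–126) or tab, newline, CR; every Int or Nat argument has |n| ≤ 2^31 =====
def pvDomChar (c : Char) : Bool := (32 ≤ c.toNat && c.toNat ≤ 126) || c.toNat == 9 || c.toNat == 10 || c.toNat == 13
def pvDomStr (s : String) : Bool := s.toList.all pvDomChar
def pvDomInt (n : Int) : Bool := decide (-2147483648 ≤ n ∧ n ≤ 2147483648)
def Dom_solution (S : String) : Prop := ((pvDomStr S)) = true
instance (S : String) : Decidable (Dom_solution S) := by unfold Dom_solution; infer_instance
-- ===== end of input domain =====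

-- B replaces A's third pass (which re-splits and re-parses every line) by one combined pass that also
-- accumulates per-number billed cost and the grand total, returning total minus the free number's cost
-- (objective: alternative decomposition; return value only, no argument is mutated).

-- ===== PORT A =====
-- duration_to_second: none exactly where Python raises (bad ':' split or int())
def dts? (duration : String) : Option Int :=
  match PySem.Str.split? duration ":" with
  | some [h, m, s] =>
    match PySem.Int.ofStr? h, PySem.Int.ofStr? m, PySem.Int.ofStr? s with
    | some a, some b, some c => some (a * 3600 + b * 60 + c)
    | _, _, _ => none
  | _ => none

-- one iteration of build_phone_log_dict's loop
def buildStep (acc : Option (PySem.Dict String Int)) (call : String) : Option (PySem.Dict String Int) :=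
  acc.bind fun logs =>
    match PySem.Str.split? call "," with
    | some [duration, phone] =>
      if phone = "" then some logs
      else
        match dts? duration with
        | some sec =>
          match logs.get? phone with
          | none => some (logs.insert phone sec)
          | some v => some (logs.insert phone (v + sec))
        | none => none
    | _ => none

def buildLogs? (calls : List String) : Option (PySem.Dict String Int) :=
  calls.foldl buildStep (some PySem.Dict.empty)

-- one iteration of get_free_phone_number's loop; none = Python's TypeError (phone_num < None)
def freeStep (logs : PySem.Dict String Int) (acc : Option (Int × Option String)) (p : String) : Option (Int × Option String) :=
  acc.bind fun st =>
    if logs.getD p 0 > st.1 then some (logs.getD p 0, some p)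
    else if logs.getD p 0 = st.1 then
      match st.2 with
      | none => none
      | some f => if p < f then some (st.1, some p) else some st
    else some st

def getFree? (logs : PySem.Dict String Int) : Option (Int × Option String) :=
  logs.keys.foldl (freeStep logs) (some (0, none))

-- one iteration of solution's billing loop
def amountStep (free : Option String) (acc : Option Int) (call : String) : Option Int :=
  acc.bind fun amount =>
    match PySem.Str.split? call "," with
    | some [duration, phone] =>
      if phone = "" then some amount
      else if some phone = free then some amount
      else
        match dts? duration with
        | some sec =>
          if sec < 300 then some (amount + 3 * sec)
          else some (amount + 150 * (PySem.Int.floordiv sec 60 + (if PySem.Int.mod sec 60 ≠ 0 then 1 else 0)))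
        | none => none
    | _ => none

def solution (S : String) : Int :=
  let calls := PySem.Str.splitlines S
  if calls.length = 0 then 0
  else
    (((buildLogs? calls).bind fun logs =>
      (getFree? logs).bind fun st =>
      calls.foldl (amountStep st.2) (some 0))).getD 0

-- ===== PORT B =====
def costOf (seconds : Int) : Int :=
  if seconds < 300 then 3 * seconds
  else 150 * (PySem.Int.floordiv seconds 60 + (if PySem.Int.mod seconds 60 ≠ 0 then 1 else 0))

-- one iteration of B's single combined pass (duration dict, cost dict, grand total)
def passStep (acc : Option (PySem.Dict String Int × PySem.Dict String Int × Int)) (call : String) :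
    Option (PySem.Dict String Int × PySem.Dict String Int × Int) :=
  acc.bind fun st =>
    match PySem.Str.split? call "," with
    | some [duration, phone] =>
      if phone = "" then some st
      else
        match PySem.Str.split? duration ":" with
        | some [h, m, s] =>
          match PySem.Int.ofStr? h, PySem.Int.ofStr? m, PySem.Int.ofStr? s with
          | some a, some b, some c =>
            let seconds := a * 3600 + b * 60 + c
            let cst := costOf seconds
            some (st.1.insert phone (st.1.getD phone 0 + seconds),
                  st.2.1.insert phone (st.2.1.getD phone 0 + cst),
                  st.2.2 + cst)
          | _, _, _ => none
        | _ => none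
    | _ => none

def bPass? (calls : List String) : Option (PySem.Dict String Int × PySem.Dict String Int × Int) :=
  calls.foldl passStep (some (PySem.Dict.empty, PySem.Dict.empty, (0 : Int)))

-- one iteration of B's free-number loop (total crash-free fold over dict items)
def bFreeStep (st : Int × Option String) (pd : String × Int) : Int × Option String :=
  if st.1 < pd.2 || (pd.2 == st.1 && (match st.2 with | some best => decide (pd.1 < best) | none => false))
  then (pd.2, some pd.1) else st

def bFree (dur : PySem.Dict String Int) : Option String :=
  (dur.items.foldl bFreeStep ((0 : Int), (none : Option String))).2

def solution_alt (S : String) : Int :=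
  let calls := PySem.Str.splitlines S
  if calls.length = 0 then 0
  else
    ((bPass? calls).map fun st =>
      st.2.2 - (match bFree st.1 with
                | some best => st.2.1.getD best 0
                | none => 0)).getD 0

-- ===== PRECONDITION & SPEC =====
-- input-side parse of one line: none = Python raises (ValueError), some none = skipped (empty phone),
-- some (some (seconds, phone)) = one billed call
def parseLine? (line : String) : Option (Option (Int × String)) :=
  match PySem.Str.split? line "," with
  | some [duration, phone] =>
    if phone = "" then some none
    else (dts? duration).map fun sec => some (sec, phone)
  | _ => none

def entriesOf (calls : List String) : List (Int × String) :=
  calls.filterMap fun l => (parseLine? l).bind id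

def totalOf (calls : List String) (p : String) : Int :=
  (((entriesOf calls).filter fun e => e.2 = p).map (·.1)).sum

def phonesOf (calls : List String) : List String :=
  PySem.Set.ofList ((entriesOf calls).map (·.2))

-- Pre_ excludes exactly the inputs on which A raises: a line that does not split into duration,phone /
-- hh:mm:ss ints (ValueError), or a first nonnegative per-number total equal to 0 (TypeError: phone < None).
def Pre_solution (S : String) : Prop :=
  (∀ line ∈ PySem.Str.splitlines S, (parseLine? line).isSome) ∧
  (∀ q ∈ ((phonesOf (PySem.Str.splitlines S)).filter fun p =>
      decide (0 ≤ totalOf (PySem.Str.splitlines S) p)).take 1,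
    0 < totalOf (PySem.Str.splitlines S) q)
instance (S : String) : Decidable (Pre_solution S) := by unfold Pre_solution; infer_instance

def pvWitness_solution : String := "1:00:00,a"

-- On inputs whose lines all parse but whose first phone number with nonnegative total duration has total 0,
-- A raises TypeError ('<' between str and None); B returns the bill with no free number subtracted
-- (Claim_raises_solution, proved at the bottom as solution_raises).
def Raises_solution (S : String) : Prop :=
  (∀ line ∈ PySem.Str.splitlines S, (parseLine? line).isSome) ∧
  (∃ q ∈ ((phonesOf (PySem.Str.splitlines S)).filter fun p =>
      decide (0 ≤ totalOf (PySem.Str.splitlines S) p)).take 1,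
    totalOf (PySem.Str.splitlines S) q = 0)
instance (S : String) : Decidable (Raises_solution S) := by unfold Raises_solution; infer_instance

def pvRaiseWitness_solution : String := "0:00:00,a\n0:01:00,b\n0:00:50,c"
def pvRaiseWitnessOut_solution : Int := 150

def Spec_solution (S : String) (out : Int) : Prop := out = solution_alt S
instance (S : String) (out : Int) : Decidable (Spec_solution S out) := by unfold Spec_solution; infer_instance

-- ===== CLAIM (what is proved, stated in full; the proofs are below) =====
def Claim_equal_solution : Prop := ∀ (S : String), Dom_solution S → Pre_solution S → Spec_solution S (solution S)
def Claim_raises_solution : Prop :=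
  (∀ (S : String), Dom_solution S → Raises_solution S → ¬ Pre_solution S) ∧
  (Dom_solution (pvRaiseWitness_solution) ∧ Raises_solution (pvRaiseWitness_solution) ∧
    solution_alt (pvRaiseWitness_solution) = pvRaiseWitnessOut_solution)

-- ===== LEMMAS AND PROOFS =====

-- spec-side folds used to characterise both first passes
def durF (entries : List (Int × String)) (d : PySem.Dict String Int) : PySem.Dict String Int :=
  entries.foldl (fun d e => d.insert e.2 (d.getD e.2 0 + e.1)) d

def costF (entries : List (Int × String)) (d : PySem.Dict String Int) : PySem.Dict String Int :=
  entries.foldl (fun d e => d.insert e.2 (d.getD e.2 0 + costOf e.1)) d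

def totCost (entries : List (Int × String)) : Int := (entries.map fun e => costOf e.1).sum

-- inversion of the input-side line parser
lemma parseLine?_none_inv {line : String} (h : parseLine? line = some none) :
    ∃ d, PySem.Str.split? line "," = some [d, ""] := by
  unfold parseLine? at h
  split at h
  · rename_i d p heq
    by_cases hp : p = ""
    · exact ⟨d, hp ▸ heq⟩
    · rw [if_neg hp] at h
      rcases hdts : dts? d with _ | sec <;> rw [hdts] at h <;> simp at h
  · simp at h

lemma parseLine?_some_inv {line : String} {e : Int × String} (h : parseLine? line = some (some e)) :
    ∃ d, PySem.Str.split? line "," = some [d, e.2] ∧ e.2 ≠ "" ∧ dts? d = some e.1 := by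
  unfold parseLine? at h
  split at h
  · rename_i d p heq
    by_cases hp : p = ""
    · rw [if_pos hp] at h; simp at h
    · rw [if_neg hp] at h
      obtain ⟨e1, e2⟩ := e
      rcases hdts : dts? d with _ | sec <;> rw [hdts] at h <;> simp at h
      obtain ⟨h1, h2⟩ := h
      subst h1; subst h2
      exact ⟨d, heq, hp, hdts⟩
  · simp at h

lemma dts?_some_inv {d : String} {sec : Int} (h : dts? d = some sec) :
    ∃ h1 m1 s1 a b c, PySem.Str.split? d ":" = some [h1, m1, s1] ∧
      PySem.Int.ofStr? h1 = some a ∧ PySem.Int.ofStr? m1 = some b ∧ PySem.Int.ofStr? s1 = some c ∧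
      sec = a * 3600 + b * 60 + c := by
  unfold dts? at h
  split at h
  · rename_i h1 m1 s1 heq
    split at h
    · rename_i a b c ha hb hc
      exact ⟨h1, m1, s1, a, b, c, heq, ha, hb, hc, by simpa using h.symm⟩
    · simp at h
  · simp at h

-- entriesOf over a cons
lemma entriesOf_cons_none {l : String} {t : List String} (h : parseLine? l = some none) :
    entriesOf (l :: t) = entriesOf t := by
  simp [entriesOf, h]

lemma entriesOf_cons_some {l : String} {t : List String} {e : Int × String}
    (h : parseLine? l = some (some e)) : entriesOf (l :: t) = e :: entriesOf t := by
  simp [entriesOf, h]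

-- the three per-line step lemmas
lemma buildStep_skip {logs : PySem.Dict String Int} {call : String}
    (h : parseLine? call = some none) : buildStep (some logs) call = some logs := by
  obtain ⟨d, hs⟩ := parseLine?_none_inv h
  unfold buildStep
  rw [Option.bind_some, hs]
  simp

lemma buildStep_entry {logs : PySem.Dict String Int} {call : String} {e : Int × String}
    (h : parseLine? call = some (some e)) :
    buildStep (some logs) call = some (logs.insert e.2 (logs.getD e.2 0 + e.1)) := by
  obtain ⟨d, hs, hp, hdts⟩ := parseLine?_some_inv h
  unfold buildStep
  rw [Option.bind_some, hs]
  simp only [if_neg hp]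
  rw [hdts]
  rcases hget : logs.get? e.2 with _ | v
  · simp [PySem.Dict.getD_of_get?_eq_none logs 0 hget]
  · simp [PySem.Dict.getD_of_get?_eq_some logs 0 hget]

lemma passStep_skip {st : PySem.Dict String Int × PySem.Dict String Int × Int} {call : String}
    (h : parseLine? call = some none) : passStep (some st) call = some st := by
  obtain ⟨d, hs⟩ := parseLine?_none_inv h
  unfold passStep
  rw [Option.bind_some, hs]
  simp

lemma passStep_entry {st : PySem.Dict String Int × PySem.Dict String Int × Int} {call : String}
    {e : Int × String} (h : parseLine? call = some (some e)) :
    passStep (some st) call = some (st.1.insert e.2 (st.1.getD e.2 0 + e.1),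
      st.2.1.insert e.2 (st.2.1.getD e.2 0 + costOf e.1), st.2.2 + costOf e.1) := by
  obtain ⟨d, hs, hp, hdts⟩ := parseLine?_some_inv h
  obtain ⟨h1, m1, s1, a, b, c, hsd, ha, hb, hc, hsec⟩ := dts?_some_inv hdts
  unfold passStep
  rw [Option.bind_some, hs]
  simp only [if_neg hp]
  simp only [hsd, ha, hb, hc, ← hsec]

lemma amountStep_skip {free : Option String} {amount : Int} {call : String}
    (h : parseLine? call = some none) : amountStep free (some amount) call = some amount := by
  obtain ⟨d, hs⟩ := parseLine?_none_inv h
  unfold amountStep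
  rw [Option.bind_some, hs]
  simp

lemma amountStep_entry {free : Option String} {amount : Int} {call : String} {e : Int × String}
    (h : parseLine? call = some (some e)) :
    amountStep free (some amount) call =
      some (if some e.2 = free then amount else amount + costOf e.1) := by
  obtain ⟨d, hs, hp, hdts⟩ := parseLine?_some_inv h
  unfold amountStep
  rw [Option.bind_some, hs]
  simp only [if_neg hp]
  by_cases hf : some e.2 = free
  · rw [if_pos hf, if_pos hf]
  · rw [if_neg hf, if_neg hf]
    simp only [hdts]
    by_cases hlt : e.1 < 300 <;> simp [costOf, hlt]

-- the three whole-pass characterisations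
lemma buildFold_eq : ∀ (calls : List String) (d : PySem.Dict String Int),
    (∀ l ∈ calls, (parseLine? l).isSome) →
    calls.foldl buildStep (some d) = some (durF (entriesOf calls) d) := by
  intro calls
  induction calls with
  | nil => intro d _; simp [entriesOf, durF]
  | cons l t ih =>
    intro d h
    have hl := h l (by simp)
    rcases ho : parseLine? l with _ | o
    · rw [ho] at hl; simp at hl
    rcases o with _ | e
    · rw [List.foldl_cons, buildStep_skip ho, entriesOf_cons_none ho]
      exact ih d (fun x hx => h x (by simp [hx]))
    · rw [List.foldl_cons, buildStep_entry ho, entriesOf_cons_some ho]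
      rw [ih _ (fun x hx => h x (by simp [hx]))]
      rfl

lemma passFold_eq : ∀ (calls : List String) (st : PySem.Dict String Int × PySem.Dict String Int × Int),
    (∀ l ∈ calls, (parseLine? l).isSome) →
    calls.foldl passStep (some st) =
      some (durF (entriesOf calls) st.1, costF (entriesOf calls) st.2.1,
        st.2.2 + totCost (entriesOf calls)) := by
  intro calls
  induction calls with
  | nil => intro st _; simp [entriesOf, durF, costF, totCost]
  | cons l t ih =>
    intro st h
    have hl := h l (by simp)
    rcases ho : parseLine? l with _ | o
    · rw [ho] at hl; simp at hl
    rcases o with _ | e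
    · rw [List.foldl_cons, passStep_skip ho, entriesOf_cons_none ho]
      exact ih st (fun x hx => h x (by simp [hx]))
    · rw [List.foldl_cons, passStep_entry ho, entriesOf_cons_some ho]
      rw [ih _ (fun x hx => h x (by simp [hx]))]
      simp only [durF, costF, totCost, List.foldl_cons, List.map_cons, List.sum_cons]
      refine congrArg some ?_
      refine Prod.ext rfl (Prod.ext rfl ?_)
      simp only
      ring

lemma amountFold_eq : ∀ (calls : List String) (free : Option String) (amount : Int),
    (∀ l ∈ calls, (parseLine? l).isSome) →
    calls.foldl (amountStep free) (some amount) =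
      some (amount + (((entriesOf calls).filter fun e => !decide (some e.2 = free)).map
        fun e => costOf e.1).sum) := by
  intro calls
  induction calls with
  | nil => intro free amount _; simp [entriesOf]
  | cons l t ih =>
    intro free amount h
    have hl := h l (by simp)
    rcases ho : parseLine? l with _ | o
    · rw [ho] at hl; simp at hl
    rcases o with _ | e
    · rw [List.foldl_cons, amountStep_skip ho, entriesOf_cons_none ho]
      exact ih free amount (fun x hx => h x (by simp [hx]))
    · rw [List.foldl_cons, amountStep_entry ho, entriesOf_cons_some ho]
      by_cases hf : some e.2 = free
      · rw [if_pos hf, ih free amount (fun x hx => h x (by simp [hx]))]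
        simp [hf]
      · rw [if_neg hf, ih free _ (fun x hx => h x (by simp [hx]))]
        simp only [List.filter_cons, hf, decide_false, Bool.not_false, if_true,
          List.map_cons, List.sum_cons]
        refine congrArg some ?_
        ring

-- lookups and keys of the spec-side dict folds
lemma durF_getD : ∀ (entries : List (Int × String)) (d : PySem.Dict String Int) (p : String),
    (durF entries d).getD p 0 =
      d.getD p 0 + ((entries.filter fun e => decide (e.2 = p)).map (·.1)).sum := by
  intro entries
  induction entries with
  | nil => intro d p; simp [durF]
  | cons e t ih =>
    intro d p
    simp only [durF, List.foldl_cons] at *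
    rw [ih]
    rw [PySem.Dict.getD_insert]
    by_cases hp : p = e.2
    · subst hp
      rw [if_pos rfl]
      simp
      ring
    · rw [if_neg hp]
      simp [Ne.symm hp]

lemma costF_getD : ∀ (entries : List (Int × String)) (d : PySem.Dict String Int) (p : String),
    (costF entries d).getD p 0 =
      d.getD p 0 + ((entries.filter fun e => decide (e.2 = p)).map fun e => costOf e.1).sum := by
  intro entries
  induction entries with
  | nil => intro d p; simp [costF]
  | cons e t ih =>
    intro d p
    simp only [costF, List.foldl_cons] at *
    rw [ih]
    rw [PySem.Dict.getD_insert]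
    by_cases hp : p = e.2
    · subst hp
      rw [if_pos rfl]
      simp
      ring
    · rw [if_neg hp]
      simp [Ne.symm hp]

lemma durF_keys (entries : List (Int × String)) :
    (durF entries PySem.Dict.empty).keys = PySem.Set.ofList (entries.map (·.2)) := by
  unfold durF
  rw [PySem.Dict.keys_foldl_insert_key entries (fun e => e.2)
    (fun d e => d.getD e.2 0 + e.1) PySem.Dict.empty]
  simp [PySem.Dict.keys_empty, PySem.Set.update, PySem.Set.ofList_eq_foldl]

lemma durF_nodup (entries : List (Int × String)) :
    (durF entries PySem.Dict.empty).keys.Nodup := by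
  unfold durF
  exact PySem.Dict.nodup_keys_foldl_insert_key entries (fun e => e.2) _ _
    (by simp [PySem.Dict.keys_empty])

lemma bFreeStep_some_ne_none (m : Int) (f k : String) (v : Int) :
    (bFreeStep (m, some f) (k, v)).2 ≠ none := by
  unfold bFreeStep
  repeat' split
  all_goals simp

-- the free-number loops agree (A's loop does not hit the TypeError under the stated condition)
lemma freeStep_agree (logs : PySem.Dict String Int) (k : String) (m : Int) (f : String) :
    freeStep logs (some (m, some f)) k = some (bFreeStep (m, some f) (k, logs.getD k 0)) := by
  unfold freeStep bFreeStep
  rw [Option.bind_some]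
  by_cases h1 : logs.getD k 0 > m
  · rw [if_pos h1]
    simp [h1]
  · rw [if_neg h1]
    by_cases h2 : logs.getD k 0 = m
    · rw [if_pos h2]
      by_cases h3 : k < f
      · simp [h2, h3]
      · simp [h2, h3]
    · rw [if_neg h2]
      simp [h1, h2]

lemma freeFold_eq (logs : PySem.Dict String Int) : ∀ (ks : List String) (st : Int × Option String),
    (st.2 = none → st.1 = 0 ∧
      ∀ q ∈ ((ks.filter fun k => decide (0 ≤ logs.getD k 0)).take 1), 0 < logs.getD q 0) →
    ks.foldl (freeStep logs) (some st) =
      some (ks.foldl (fun s k => bFreeStep s (k, logs.getD k 0)) st) := by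
  intro ks
  induction ks with
  | nil => intro st _; rfl
  | cons k t ih =>
    intro st h
    rcases st with ⟨m, _ | f⟩
    · obtain ⟨hm0, hcond⟩ := h rfl
      subst hm0
      simp only [List.foldl_cons]
      by_cases hpos : 0 < logs.getD k 0
      · have hstepA : freeStep logs (some (0, none)) k = some (logs.getD k 0, some k) := by
          unfold freeStep
          rw [Option.bind_some, if_pos hpos]
        have hstepB : bFreeStep ((0 : Int), (none : Option String)) (k, logs.getD k 0) =
            (logs.getD k 0, some k) := by
          unfold bFreeStep
          simp [hpos]
        rw [hstepA, hstepB]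
        exact ih _ (by intro hc; simp at hc)
      · have hne : logs.getD k 0 ≠ 0 := by
          intro h0
          have hk : k ∈ (((k :: t).filter fun k => decide (0 ≤ logs.getD k 0)).take 1) := by
            simp [h0]
          have := hcond k hk
          omega
        have hlt : logs.getD k 0 < 0 := by omega
        have hstepA : freeStep logs (some ((0 : Int), (none : Option String))) k =
            some (0, none) := by
          unfold freeStep
          rw [Option.bind_some, if_neg (by omega), if_neg hne]
        have hstepB : bFreeStep ((0 : Int), (none : Option String)) (k, logs.getD k 0) =
            (0, none) := by
          unfold bFreeStep
          simp [hne]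
          omega
        rw [hstepA, hstepB]
        refine ih _ (fun _ => ⟨rfl, ?_⟩)
        have : ((k :: t).filter fun k => decide (0 ≤ logs.getD k 0)) =
            (t.filter fun k => decide (0 ≤ logs.getD k 0)) := by
          rw [List.filter_cons, if_neg (by simp; omega)]
        rw [this] at hcond
        exact hcond
    · simp only [List.foldl_cons]
      rw [freeStep_agree]
      exact ih _ (fun hc => absurd hc (bFreeStep_some_ne_none _ _ _ _))

lemma bFree_eq_keysFold (logs : PySem.Dict String Int) (hnd : logs.keys.Nodup) :
    bFree logs = (logs.keys.foldl (fun s k => bFreeStep s (k, logs.getD k 0)) (0, none)).2 := by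
  unfold bFree
  rw [PySem.Dict.items_eq_map_keys logs hnd 0, List.foldl_map]

-- splitting a cost sum by the free number
lemma sum_map_filter_split {α : Type} (l : List α) (p : α → Bool) (g : α → Int) :
    ((l.filter p).map g).sum + ((l.filter fun x => !p x).map g).sum = (l.map g).sum := by
  induction l with
  | nil => simp
  | cons x t ih =>
    by_cases h : p x <;> simp [h, List.sum_cons] <;> linarith [ih]

-- ===== VERDICT (by name: the statement is the Claim_ definition above) =====
theorem solution_spec : Claim_equal_solution := by
  unfold Claim_equal_solution
  intro S _ hpre
  unfold Spec_solution solution solution_alt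
  obtain ⟨hparse, hfree⟩ := hpre
  by_cases h0 : (PySem.Str.splitlines S).length = 0
  · simp only [h0, if_true]
  · simp only [if_neg h0]
    set calls := PySem.Str.splitlines S with hc
    set E := entriesOf calls with hE
    set D := durF E PySem.Dict.empty with hD
    set C := costF E PySem.Dict.empty with hC
    have hgetD : ∀ p, D.getD p 0 = totalOf calls p := by
      intro p
      rw [hD, durF_getD]
      simp [totalOf, PySem.Dict.getD_empty, hE]
    have hkeys : D.keys = phonesOf calls := by
      rw [hD, durF_keys]; rfl
    have hnd : D.keys.Nodup := hD ▸ durF_nodup E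
    have hbuild : buildLogs? calls = some D := buildFold_eq calls _ hparse
    have hpass : bPass? calls = some (D, C, 0 + totCost E) := passFold_eq calls _ hparse
    set stK := D.keys.foldl (fun s k => bFreeStep s (k, D.getD k 0)) ((0 : Int), (none : Option String)) with hstK
    have hfreeA : getFree? D = some stK := by
      unfold getFree?
      refine freeFold_eq D D.keys ((0 : Int), (none : Option String)) (fun _ => ⟨rfl, ?_⟩)
      simp only [hgetD, hkeys]
      exact hfree
    have hfreeB : bFree D = stK.2 := by
      rw [bFree_eq_keysFold D hnd, hstK]
    have hamount : calls.foldl (amountStep stK.2) (some 0) =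
        some (0 + ((E.filter fun e => !decide (some e.2 = stK.2)).map fun e => costOf e.1).sum) :=
      amountFold_eq calls _ 0 hparse
    rw [hbuild, hpass, Option.bind_some, hfreeA, Option.bind_some, hamount]
    simp only [Option.map_some, Option.getD_some, zero_add]
    rw [hfreeB]
    rcases hcase : stK.2 with _ | f
    · simp [totCost]
    · have hCf : C.getD f 0 = ((E.filter fun e => decide (e.2 = f)).map fun e => costOf e.1).sum := by
        rw [hC, costF_getD]
        simp [PySem.Dict.getD_empty]
      have hmatch : (match some f with | some best => C.getD best 0 | none => (0 : Int)) = C.getD f 0 := rfl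
      rw [hmatch, hCf]
      have hsplit := sum_map_filter_split E (fun e => decide (e.2 = f)) (fun e => costOf e.1)
      have hpred : (E.filter fun e => !decide (some e.2 = some f)) =
          (E.filter fun e => !decide (e.2 = f)) := by
        simp
      rw [hpred]
      unfold totCost
      linarith [hsplit]

theorem solution_raises : Claim_raises_solution := by
  unfold Claim_raises_solution
  refine ⟨?_, by decide⟩
  rintro S _ ⟨_, q, hq, hq0⟩ ⟨_, hall⟩
  have := hall q hq
  omega

-- self-check that the crash-fix claim really covers its witness (consumes solution_raises)
theorem solution_raises_ok : Raises_solution pvRaiseWitness_solution := by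
  have h := solution_raises
  unfold Claim_raises_solution at h
  exact h.2.2.1
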